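-- pv_equiv track=rewrite | github.com/protodomemusic/super-wavexe | compiler/midi-to-4ml.py | decompose_notes
-- ===== SOURCE A (Python) =====
-- def decompose_notes(total_128th_notes):
--     note_values = {
--         "1": 128,
--         "2":  64,
--         "4":  32,
--         "8":  16,
--         "16":  8,
--         "32":  4,
--         "64":  2,
--         "128": 1
--     }
--     result = []
--     for note, value in note_values.items():
--         while total_128th_notes >= value:
--             total_128th_notes -= value
--             result.append(note)
--     return result
-- ===== SOURCE B (Python) =====
-- def decompose_notes(total_128th_notes):
--     result = []
--     for note, value in (("1", 128), ("2", 64), ("4", 32), ("8", 16),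
--                         ("16", 8), ("32", 4), ("64", 2), ("128", 1)):
--         count = total_128th_notes // value
--         if count > 0:
--             result.extend([note] * count)
--             total_128th_notes -= count * value
--     return result
-- ===== Notes on version B (the rewrite author's own statement) =====
-- stated objective: faster
-- what changed: Replaces the inner repeated-subtraction while loop with one integer division per duration (extend with note repeated count times), keeping the same outer order.
import Mathlib
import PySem

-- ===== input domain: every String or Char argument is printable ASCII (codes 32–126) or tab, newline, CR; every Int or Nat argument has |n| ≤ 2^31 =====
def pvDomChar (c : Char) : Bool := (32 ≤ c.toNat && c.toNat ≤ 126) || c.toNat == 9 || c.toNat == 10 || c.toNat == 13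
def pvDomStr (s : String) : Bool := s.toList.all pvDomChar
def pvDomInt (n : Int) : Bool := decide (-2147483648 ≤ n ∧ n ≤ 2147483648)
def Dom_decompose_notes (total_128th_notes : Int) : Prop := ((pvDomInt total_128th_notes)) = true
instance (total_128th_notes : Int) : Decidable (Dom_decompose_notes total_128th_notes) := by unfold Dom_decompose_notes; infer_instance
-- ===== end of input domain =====

-- B replaces A's inner repeated-subtraction while loop with one integer division per
-- note duration (constant-factor faster when counts are large); same output order.


-- ===== PORT A =====
-- the ordered dict note_values, as an association list in insertion order
def pvNoteValues : List (String × Int) :=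
  [("1", 128), ("2", 64), ("4", 32), ("8", 16), ("16", 8), ("32", 4), ("64", 2), ("128", 1)]

-- the inner 'while total >= value: total -= value; result.append(note)' loop;
-- the '0 < value' conjunct is only a totality guard (every value in pvNoteValues is positive)
def pvWhileA (note : String) (value : Int) (t : Int) : List String × Int :=
  if h : value ≤ t ∧ 0 < value then
    let p := pvWhileA note value (t - value)
    (note :: p.1, p.2)
  else ([], t)
termination_by t.toNat
decreasing_by omega

def decompose_notes (total_128th_notes : Int) : List String :=
  (pvNoteValues.foldl
    (fun (st : List String × Int) nv =>
      let p := pvWhileA nv.1 nv.2 st.2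
      (st.1 ++ p.1, p.2))
    ([], total_128th_notes)).1

-- ===== PORT B =====
def decompose_notes_alt (total_128th_notes : Int) : List String :=
  (pvNoteValues.foldl
    (fun (st : List String × Int) nv =>
      let count := PySem.Int.floordiv st.2 nv.2
      if 0 < count then (st.1 ++ List.replicate count.toNat nv.1, st.2 - count * nv.2)
      else st)
    ([], total_128th_notes)).1

-- ===== PRECONDITION & SPEC =====
def Spec_decompose_notes (total_128th_notes : Int) (out : List String) : Prop := out = decompose_notes_alt total_128th_notes
instance (total_128th_notes : Int) (out : List String) : Decidable (Spec_decompose_notes total_128th_notes out) := by unfold Spec_decompose_notes; infer_instance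

-- ===== CLAIM (what is proved, stated in full; the proofs are below) =====
def Claim_equal_decompose_notes : Prop := ∀ (total_128th_notes : Int), Dom_decompose_notes total_128th_notes → Spec_decompose_notes total_128th_notes (decompose_notes total_128th_notes)

-- ===== LEMMAS AND PROOFS =====

-- the while loop produces exactly (t / value) copies (0 if t / value ≤ 0) and the remainder state
theorem pvWhileA_eq (note : String) (value : Int) (hv : 0 < value) (t : Int) :
    pvWhileA note value t =
      (List.replicate (t / value).toNat note, t - value * ((t / value).toNat : Int)) := by
  generalize hn : t.toNat = n
  induction n using Nat.strong_induction_on generalizing t with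
  | _ n ih =>
    rw [pvWhileA]
    by_cases hle : value ≤ t
    · have hc1 : 1 ≤ t / value := (Int.le_ediv_iff_mul_le hv).mpr (by omega)
      have hrec := ih (t - value).toNat (by omega) (t - value) rfl
      have hdiv : (t - value) / value = t / value - 1 := by
        have h := Int.add_mul_ediv_right t (-1) (show value ≠ 0 by omega)
        rw [show t - value = t + -1 * value by ring, h]; ring
      simp only [hle, hv, and_self, dif_pos, hrec, hdiv]
      rw [Prod.mk.injEq]
      constructor
      · have : (t / value).toNat = ((t / value - 1).toNat) + 1 := by omega
        rw [this, List.replicate_succ]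
      · have hcast : ((t / value - 1).toNat : Int) = ((t / value).toNat : Int) - 1 := by omega
        rw [hcast]; ring
    · have hc0 : t / value < 1 := by
        rw [Int.ediv_lt_iff_lt_mul hv]; omega
      simp only [hle, false_and, dif_neg, not_false_iff]
      rw [Prod.mk.injEq]
      constructor
      · have : (t / value).toNat = 0 := by omega
        simp [this]
      · have : (t / value).toNat = 0 := by omega
        simp [this]

-- one outer-loop step of A equals one outer-loop step of B, for a positive value
theorem pvStep_eq (note : String) (value : Int) (hv : 0 < value) (st : List String × Int) :
    (st.1 ++ (pvWhileA note value st.2).1, (pvWhileA note value st.2).2) =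
      (let count := PySem.Int.floordiv st.2 value
       if 0 < count then (st.1 ++ List.replicate count.toNat note, st.2 - count * value)
       else st) := by
  rw [pvWhileA_eq note value hv st.2]
  have hfd : PySem.Int.floordiv st.2 value = st.2 / value :=
    PySem.Int.floordiv_eq_ediv_of_pos hv
  simp only [hfd]
  by_cases h : 0 < st.2 / value
  · have : ((st.2 / value).toNat : Int) = st.2 / value := by omega
    simp [h, this, mul_comm]
  · have h0 : (st.2 / value).toNat = 0 := by omega
    simp [h, h0]

theorem pvFold_eq (l : List (String × Int)) (h : ∀ p ∈ l, 0 < p.2) (st : List String × Int) :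
    l.foldl (fun (st : List String × Int) nv =>
        let p := pvWhileA nv.1 nv.2 st.2
        (st.1 ++ p.1, p.2)) st =
      l.foldl (fun (st : List String × Int) nv =>
        let count := PySem.Int.floordiv st.2 nv.2
        if 0 < count then (st.1 ++ List.replicate count.toNat nv.1, st.2 - count * nv.2)
        else st) st := by
  induction l generalizing st with
  | nil => rfl
  | cons nv rest ih =>
    simp only [List.foldl_cons]
    rw [pvStep_eq nv.1 nv.2 (h nv (by simp)) st]
    exact ih (fun p hp => h p (by simp [hp])) _

-- ===== VERDICT (by name: the statement is the Claim_ definition above) =====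
theorem decompose_notes_spec : Claim_equal_decompose_notes := by
  intro t _
  unfold Spec_decompose_notes decompose_notes decompose_notes_alt
  rw [pvFold_eq pvNoteValues (by decide) ([], t)]
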